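-- pv_equiv track=rewrite | github.com/gitlost-murali/noah-research | NLP/GenerateRank/svampgen/RANKgen-svamp.py | equation_to_natural_language
-- ===== SOURCE A (Python) =====
-- from typing import List
--
-- def equation_to_natural_language(equation: str) -> str:
--     def tokenize(expression: str) -> List[str]:
--         tokens = []
--         current_token = ''
--         for char in expression:
--             if char in ['+', '-', '*', '/', '(', ')']:
--                 if current_token:
--                     tokens.append(current_token.strip())
--                     current_token = ''
--                 tokens.append(char)
--             else:
--                 current_token += char
--         if current_token:
--             tokens.append(current_token.strip())
--         return tokens
--
--     def infix_to_postfix(infix: List[str]) -> List[str]: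
--         stack = []
--         postfix = []
--         for i in infix:
--             if i == '(':
--                 stack.append(i)
--             elif i == '':
--                 continue
--             elif i == ')':
--                 while stack[-1] != '(':
--                     postfix.append(stack.pop())
--                 stack.pop()
--             elif i in ['+', '-', '*', '/']:
--                 while stack and stack[-1] != '(' and stack[-1] in ['+', '-', '*', '/']:
--                     postfix.append(stack.pop())
--                 stack.append(i)
--             else:
--                 postfix.append(i)
--         while stack:
--             postfix.append(stack.pop())
--         return postfix
--
--     def postfix_to_natural_language(postfix: List[str]) -> str:
--         stack = []
--         for token in postfix:
--             if token in ['+', '-', '*', '/']: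
--                 right = stack.pop()
--                 left = stack.pop()
--                 if token == '+':
--                     stack.append(f"({left} plus {right})")
--                 elif token == '-':
--                     stack.append(f"({left} minus {right})")
--                 elif token == '*':
--                     stack.append(f"({left} times {right})")
--                 elif token == '/':
--                     stack.append(f"({left} divided by {right})")
--             else:
--                 stack.append(token)
--         return stack.pop()
--
--     infix_tokens = tokenize(equation)
--     postfix_tokens = infix_to_postfix(infix_tokens)
--     try:
--         return postfix_to_natural_language(postfix_tokens)
--     except:
--         return "Incorrect equation"
-- ===== SOURCE B (Python) =====
-- from typing import List
--
-- def equation_to_natural_language(equation: str) -> str: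
--     OPS = {'+': 'plus', '-': 'minus', '*': 'times', '/': 'divided by'}
--
--     def tokenize(expression: str) -> List[str]:   # unchanged from the original
--         tokens = []
--         current_token = ''
--         for char in expression:
--             if char in ['+', '-', '*', '/', '(', ')']:
--                 if current_token:
--                     tokens.append(current_token.strip())
--                     current_token = ''
--                 tokens.append(char)
--             else:
--                 current_token += char
--         if current_token:
--             tokens.append(current_token.strip())
--         return tokens
--
--     def evaluate(tokens: List[str]) -> str:
--         values = []    # finished phrases
--         pending = []   # operators and '(' still waiting for their right operand
--         def emit(token: str) -> None:
--             if token in OPS: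
--                 right = values.pop()
--                 left = values.pop()
--                 values.append(f"({left} {OPS[token]} {right})")
--             else:
--                 values.append(token)
--         for token in tokens:
--             if token == '(':
--                 pending.append(token)
--             elif token == ')':
--                 while pending[-1] != '(':
--                     emit(pending.pop())
--                 pending.pop()
--             elif token in OPS:
--                 while pending and pending[-1] != '(':
--                     emit(pending.pop())
--                 pending.append(token)
--             else:
--                 emit(token)
--         while pending:
--             emit(pending.pop())
--         return values.pop()
--
--     try:
--         return evaluate([t for t in tokenize(equation) if t])
--     except:
--         return "Incorrect equation"
-- ===== Notes on version B (the rewrite author's own statement) =====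
-- stated objective: alternative
-- what changed: B keeps tokenize but deletes A's two-phase pipeline (build a full postfix token list, then evaluate it with a second stack loop): B evaluates the infix token stream in a single pass with an operator stack and a phrase stack, building each natural-language phrase the moment its operator is reduced, so the intermediate postfix list never exists.
-- crash fix: On every string having a prefix with more closing than opening parentheses A raises an uncaught IndexError inside infix_to_postfix; B returns the sentinel text Incorrect equation there. — e.g. on equation_to_natural_language(")"): A raises IndexError, B returns "Incorrect equation"
import Mathlib
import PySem

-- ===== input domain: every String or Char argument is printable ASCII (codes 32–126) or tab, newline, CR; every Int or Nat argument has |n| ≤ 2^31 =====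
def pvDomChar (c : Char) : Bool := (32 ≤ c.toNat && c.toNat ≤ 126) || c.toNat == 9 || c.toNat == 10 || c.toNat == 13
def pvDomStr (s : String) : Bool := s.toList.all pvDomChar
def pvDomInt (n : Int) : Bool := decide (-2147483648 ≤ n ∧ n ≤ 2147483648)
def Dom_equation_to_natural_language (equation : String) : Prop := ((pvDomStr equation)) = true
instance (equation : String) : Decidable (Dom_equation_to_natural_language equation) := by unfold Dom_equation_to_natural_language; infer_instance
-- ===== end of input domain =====

-- B fuses A's two phases (infix→postfix list, then postfix evaluation) into one single-pass
-- evaluator over the token stream (operator stack + phrase stack, no intermediate postfix list);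
-- objective: alternative (same O(n·|output|) cost, different structure).


-- ===== PORT A =====

def pvSpecial : List Char := ['+', '-', '*', '/', '(', ')']

-- tokenize: current_token accumulated in order, flushed (stripped) before each special char and at the end
def pvTokenizeGo : List Char → List Char → List String
  | [], cur => if cur.isEmpty then [] else [PySem.Str.strip (String.ofList cur)]
  | c :: cs, cur =>
    if pvSpecial.contains c then
      if cur.isEmpty then String.ofList [c] :: pvTokenizeGo cs []
      else PySem.Str.strip (String.ofList cur) :: String.ofList [c] :: pvTokenizeGo cs []
    else pvTokenizeGo cs (cur ++ [c])

def pvTokenize (s : String) : List String := pvTokenizeGo s.toList []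

def pvIsOp (t : String) : Bool := t == "+" || t == "-" || t == "*" || t == "/"

-- the `while stack[-1] != '(':` loop of the ')' branch; none = IndexError on an empty stack (uncaught in Python)
def pvPopUntil : List String → List String → Option (List String × List String)
  | [], _ => none
  | x :: rest, post => if x = "(" then some (rest, post) else pvPopUntil rest (post ++ [x])

-- the `while stack and stack[-1] != '(' and stack[-1] in [...]` loop of the operator branch
def pvPopOps : List String → List String → List String × List String
  | [], post => ([], post)
  | x :: rest, post =>
    if x ≠ "(" ∧ pvIsOp x = true then pvPopOps rest (post ++ [x]) else (x :: rest, post)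

def pvShuntGo : List String → List String → List String → Option (List String)
  | [], stack, post => some (post ++ stack)
  | t :: ts, stack, post =>
    if t = "(" then pvShuntGo ts ("(" :: stack) post
    else if t = "" then pvShuntGo ts stack post
    else if t = ")" then
      match pvPopUntil stack post with
      | none => none
      | some sp => pvShuntGo ts sp.1 sp.2
    else if pvIsOp t then
      let sp := pvPopOps stack post
      pvShuntGo ts (t :: sp.1) sp.2
    else pvShuntGo ts stack (post ++ [t])

-- one step of postfix_to_natural_language's loop; none = IndexError from stack.pop() (caught by the try)
def pvEmitA (st : List String) (t : String) : Option (List String) :=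
  if pvIsOp t then
    match st with
    | r :: l :: rest =>
      some ((if t = "+" then String.ofList ('(' :: (l.toList ++ (" plus ".toList ++ (r.toList ++ [')']))))
             else if t = "-" then String.ofList ('(' :: (l.toList ++ (" minus ".toList ++ (r.toList ++ [')']))))
             else if t = "*" then String.ofList ('(' :: (l.toList ++ (" times ".toList ++ (r.toList ++ [')']))))
             else String.ofList ('(' :: (l.toList ++ (" divided by ".toList ++ (r.toList ++ [')']))))) :: rest)
    | _ => none
  else some (t :: st)

def pvEvalFold : List String → List String → Option (List String)
  | [], st => some st
  | t :: ts, st => (pvEmitA st t).bind (pvEvalFold ts)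

def equation_to_natural_language (equation : String) : String :=
  match pvShuntGo (pvTokenize equation) [] [] with
  | none => ""        -- here the Python raises an uncaught IndexError (unmatched ')'); excluded by Pre_
  | some post =>
    match (pvEvalFold post []).bind List.head? with
    | some r => r
    | none => "Incorrect equation"

-- ===== PORT B =====

def pvOPS : PySem.Dict String String :=
  PySem.Dict.ofList [("+", "plus"), ("-", "minus"), ("*", "times"), ("/", "divided by")]

-- evaluate's nested emit(token): reduce with an operator, or push a finished phrase
def pvEmitB (values : List String) (t : String) : Option (List String) :=
  if pvOPS.contains t then
    match values with
    | r :: l :: rest =>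
      some (String.ofList ('(' :: (l.toList ++ (' ' :: ((pvOPS.getD t "").toList ++ (' ' :: (r.toList ++ [')'])))))) :: rest)
    | _ => none
  else some (t :: values)

-- `while pending[-1] != '(': emit(pending.pop())` then `pending.pop()`; none = IndexError / failed emit
def pvDrainUntil : List String → List String → Option (List String × List String)
  | [], _ => none
  | x :: rest, v =>
    if x = "(" then some (rest, v)
    else (pvEmitB v x).bind fun v' => pvDrainUntil rest v'

-- `while pending and pending[-1] != '(': emit(pending.pop())`
def pvDrainOps : List String → List String → Option (List String × List String)
  | [], v => some ([], v)
  | x :: rest, v =>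
    if x = "(" then some (x :: rest, v)
    else (pvEmitB v x).bind fun v' => pvDrainOps rest v'

def pvBGo : List String → List String → List String → Option (List String × List String)
  | [], v, p => some (v, p)
  | t :: ts, v, p =>
    if t = "(" then pvBGo ts v ("(" :: p)
    else if t = ")" then (pvDrainUntil p v).bind fun sp => pvBGo ts sp.2 sp.1
    else if pvOPS.contains t then (pvDrainOps p v).bind fun sp => pvBGo ts sp.2 (t :: sp.1)
    else (pvEmitB v t).bind fun v' => pvBGo ts v' p

-- final `while pending: emit(pending.pop())`
def pvDrainAll : List String → List String → Option (List String)
  | [], v => some v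
  | x :: rest, v => (pvEmitB v x).bind (pvDrainAll rest)

def equation_to_natural_language_alt (equation : String) : String :=
  match (pvBGo ((pvTokenize equation).filter (fun t => t != "")) [] []).bind
          (fun vp => (pvDrainAll vp.2 vp.1).bind List.head?) with
  | some r => r
  | none => "Incorrect equation"

-- ===== PRECONDITION & SPEC =====

def pvBalGo : List Char → Nat → Bool
  | [], _ => true
  | c :: cs, d =>
    if c = '(' then pvBalGo cs (d + 1)
    else if c = ')' then decide (0 < d) && pvBalGo cs (d - 1)
    else pvBalGo cs d

-- Pre_ excludes exactly the strings having a prefix with more closing than opening parentheses —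
-- on those the Python A raises an uncaught IndexError inside infix_to_postfix (no value is returned).
def Pre_equation_to_natural_language (equation : String) : Prop :=
  pvBalGo equation.toList 0 = true

instance (equation : String) : Decidable (Pre_equation_to_natural_language equation) := by
  unfold Pre_equation_to_natural_language; infer_instance

def pvWitness_equation_to_natural_language : String := "1+2*3"

-- A raises an uncaught IndexError on every string with a prefix containing more closing than
-- opening parentheses; B returns the Incorrect-equation sentinel there.
def Raises_equation_to_natural_language (equation : String) : Prop :=
  pvBalGo equation.toList 0 = false

instance (equation : String) : Decidable (Raises_equation_to_natural_language equation) := by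
  unfold Raises_equation_to_natural_language; infer_instance

def pvRaiseWitness_equation_to_natural_language : String := ")"
def pvRaiseWitnessOut_equation_to_natural_language : String := "Incorrect equation"

def Spec_equation_to_natural_language (equation : String) (out : String) : Prop :=
  out = equation_to_natural_language_alt equation
instance (equation : String) (out : String) : Decidable (Spec_equation_to_natural_language equation out) := by
  unfold Spec_equation_to_natural_language; infer_instance

-- ===== CLAIM (what is proved, stated in full; the proofs are below) =====
def Claim_equal_equation_to_natural_language : Prop :=
  ∀ (equation : String), Dom_equation_to_natural_language equation →
    Pre_equation_to_natural_language equation →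
    Spec_equation_to_natural_language equation (equation_to_natural_language equation)

def Claim_raises_equation_to_natural_language : Prop :=
  (∀ (equation : String), Dom_equation_to_natural_language equation →
      Raises_equation_to_natural_language equation → ¬ Pre_equation_to_natural_language equation) ∧
  (Dom_equation_to_natural_language (pvRaiseWitness_equation_to_natural_language) ∧
   Raises_equation_to_natural_language (pvRaiseWitness_equation_to_natural_language) ∧
   equation_to_natural_language_alt (pvRaiseWitness_equation_to_natural_language) =
     pvRaiseWitnessOut_equation_to_natural_language)

-- ===== LEMMAS AND PROOFS =====

-- paren-balance check lifted to token lists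
def pvTokOk : List String → Nat → Bool
  | [], _ => true
  | t :: ts, d =>
    if t = "(" then pvTokOk ts (d + 1)
    else if t = ")" then decide (0 < d) && pvTokOk ts (d - 1)
    else pvTokOk ts d

theorem pv_strip_not_paren (cur : List Char) (h : ∀ c ∈ cur, pvSpecial.contains c = false)
    (c : Char) (hc : pvSpecial.contains c = true) :
    PySem.Str.strip (String.ofList cur) ≠ String.ofList [c] := by
  intro heq
  have h2 : PySem.Chars.strip cur = [c] := by
    have h3 := congrArg String.toList heq
    simpa [PySem.Str.toList_strip, String.toList_ofList] using h3
  have hsub : (PySem.Chars.strip cur).Sublist cur := by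
    unfold PySem.Chars.strip PySem.Chars.rstrip PySem.Chars.lstrip
    refine List.Sublist.trans ?_ (List.dropWhile_sublist (l := cur) PySem.Chars.isspace)
    have h4 := (List.dropWhile_sublist (l := (List.dropWhile PySem.Chars.isspace cur).reverse)
      PySem.Chars.isspace).reverse
    simpa using h4
  have hmem : c ∈ cur := hsub.subset (h2 ▸ List.mem_singleton_self c)
  have h5 := h c hmem
  rw [hc] at h5
  exact absurd h5 (by simp)


theorem pv_tokOk_tokenizeGo (cs : List Char) (cur : List Char) (d : Nat)
    (h : ∀ c ∈ cur, pvSpecial.contains c = false) :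
    pvTokOk (pvTokenizeGo cs cur) d = pvBalGo cs d := by
  induction cs generalizing cur d with
  | nil =>
    simp only [pvTokenizeGo, pvBalGo]
    split
    · simp [pvTokOk]
    · rename_i hcur
      have h1 := pv_strip_not_paren cur h '(' (by decide)
      have h2 := pv_strip_not_paren cur h ')' (by decide)
      simp only [pvTokOk]
      rw [if_neg (by simpa using h1), if_neg (by simpa using h2)]
  | cons c cs ih =>
    by_cases hsp : pvSpecial.contains c = true
    · have hflush : ∀ d' : Nat, pvTokOk (pvTokenizeGo (c :: cs) cur) d' =
          pvTokOk (String.ofList [c] :: pvTokenizeGo cs []) d' := by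
        intro d'
        simp only [pvTokenizeGo, hsp, if_pos]
        split
        · rfl
        · have h1 := pv_strip_not_paren cur h '(' (by decide)
          have h2 := pv_strip_not_paren cur h ')' (by decide)
          simp only [pvTokOk]
          rw [if_neg (by simpa using h1), if_neg (by simpa using h2)]
      rw [hflush d]
      have hnil : ∀ x ∈ ([] : List Char), pvSpecial.contains x = false := by simp
      simp only [pvSpecial, List.contains_eq_mem, List.mem_cons, List.not_mem_nil, or_false,
        decide_eq_true_eq] at hsp
      rcases hsp with h' | h' | h' | h' | h' | h' <;> subst h' <;>
        simp [pvTokOk, pvBalGo, ih [] _ hnil]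
    · have hc : ('(' : Char) ≠ c ∧ (')' : Char) ≠ c := by
        constructor <;> intro h' <;> subst h' <;> simp [pvSpecial] at hsp
      have hext : ∀ x ∈ cur ++ [c], pvSpecial.contains x = false := by
        intro x hx
        rcases List.mem_append.mp hx with hx | hx
        · exact h x hx
        · simp only [List.mem_singleton] at hx; subst hx
          exact Bool.not_eq_true _ ▸ (by simpa using hsp)
      rw [show pvTokenizeGo (c :: cs) cur = pvTokenizeGo cs (cur ++ [c]) by
        simp only [pvTokenizeGo]; rw [if_neg hsp]]
      rw [ih (cur ++ [c]) d hext]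
      simp only [pvBalGo]
      rw [if_neg (fun h' : c = '(' => hc.1 (Eq.symm h')), if_neg (fun h' : c = ')' => hc.2 (Eq.symm h'))]


theorem pv_popUntil_some (stack post : List String) (h : 0 < stack.count "(") :
    ∃ sp, pvPopUntil stack post = some sp ∧ sp.1.count "(" + 1 = stack.count "(" := by
  induction stack generalizing post with
  | nil => simp at h
  | cons x rest ih =>
    by_cases hx : x = "("
    · subst hx
      exact ⟨(rest, post), by simp [pvPopUntil], by simpa using h⟩
    · have h' : 0 < rest.count "(" := by
        simpa [List.count_cons, hx, Ne.symm hx] using h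
      obtain ⟨sp, hsp, hcnt⟩ := ih (post ++ [x]) h'
      refine ⟨sp, ?_, ?_⟩
      · simp only [pvPopUntil, if_neg hx]; exact hsp
      · rw [hcnt]; simp [hx]


theorem pv_popOps_count (stack post : List String) :
    (pvPopOps stack post).1.count "(" = stack.count "(" := by
  induction stack generalizing post with
  | nil => simp [pvPopOps]
  | cons x rest ih =>
    simp only [pvPopOps]
    split
    · rename_i hcond
      rw [ih]
      simp [hcond.1]
    · rfl


theorem pv_isOp_ne_paren (t : String) (h : pvIsOp t = true) : t ≠ "(" ∧ t ≠ ")" := by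
  simp only [pvIsOp, Bool.or_eq_true, beq_iff_eq] at h
  rcases h with ((h | h) | h) | h <;> subst h <;> exact ⟨by decide, by decide⟩


theorem pv_shunt_success (ts : List String) : ∀ stack post, pvTokOk ts (stack.count "(") = true →
    ∃ r, pvShuntGo ts stack post = some r := by
  induction ts with
  | nil => exact fun stack post _ => ⟨post ++ stack, rfl⟩
  | cons t ts ih =>
    intro stack post h
    simp only [pvShuntGo]
    by_cases ht1 : t = "("
    · rw [if_pos ht1]
      refine ih ("(" :: stack) post ?_
      simp only [pvTokOk, if_pos ht1] at h
      simpa [List.count_cons] using h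
    · rw [if_neg ht1]
      by_cases ht0 : t = ""
      · rw [if_pos ht0]
        refine ih stack post ?_
        simpa [pvTokOk, ht1, ht0] using h
      · rw [if_neg ht0]
        by_cases ht2 : t = ")"
        · rw [if_pos ht2]
          simp only [pvTokOk, if_neg ht1, if_pos ht2, Bool.and_eq_true, decide_eq_true_eq] at h
          obtain ⟨sp, hsp, hcnt⟩ := pv_popUntil_some stack post h.1
          rw [hsp]
          refine ih sp.1 sp.2 ?_
          have : sp.1.count "(" = stack.count "(" - 1 := by omega
          rw [this]; exact h.2
        · rw [if_neg ht2]
          have hh : pvTokOk ts (stack.count "(") = true := by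
            simpa [pvTokOk, ht1, ht2] using h
          by_cases ht3 : pvIsOp t = true
          · rw [if_pos ht3]
            refine ih _ _ ?_
            have hne := (pv_isOp_ne_paren t ht3).1
            simp [List.count_cons, hne, pv_popOps_count]
            exact hh
          · rw [if_neg ht3]
            exact ih stack (post ++ [t]) hh


theorem pv_shunt_filter (ts : List String) : ∀ stack post,
    pvShuntGo (ts.filter (fun t => t != "")) stack post = pvShuntGo ts stack post := by
  induction ts with
  | nil => intro stack post; rfl
  | cons t ts ih =>
    intro stack post
    by_cases ht0 : t = ""
    · subst ht0
      have : (("" : String) != "") = false := by decide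
      simp only [List.filter_cons, this, Bool.false_eq_true, if_false]
      rw [ih]
      simp only [pvShuntGo]
      rw [if_neg (show ¬("" : String) = "(" by decide)]
      simp
    · have : ((t : String) != "") = true := by simpa using ht0
      simp only [List.filter_cons, this, if_true]
      simp only [pvShuntGo]
      by_cases ht1 : t = "("
      · rw [if_pos ht1, if_pos ht1, ih]
      · rw [if_neg ht1, if_neg ht1, if_neg ht0, if_neg ht0]
        by_cases ht2 : t = ")"
        · rw [if_pos ht2, if_pos ht2]
          cases hpu : pvPopUntil stack post <;> simp [ih]
        · rw [if_neg ht2, if_neg ht2]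
          by_cases ht3 : pvIsOp t = true
          · rw [if_pos ht3, if_pos ht3, ih]
          · rw [if_neg ht3, if_neg ht3, ih]


theorem pv_popUntil_acc (stack : List String) : ∀ post,
    pvPopUntil stack post = (pvPopUntil stack []).map fun sp => (sp.1, post ++ sp.2) := by
  induction stack with
  | nil => intro post; rfl
  | cons x rest ih =>
    intro post
    by_cases hx : x = "("
    · simp [pvPopUntil, hx]
    · simp only [pvPopUntil, if_neg hx, List.nil_append]
      rw [ih (post ++ [x]), ih [x]]
      cases hr : pvPopUntil rest [] <;> simp [List.append_assoc]


theorem pv_popOps_acc (stack : List String) : ∀ post,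
    pvPopOps stack post = ((pvPopOps stack []).1, post ++ (pvPopOps stack []).2) := by
  induction stack with
  | nil => intro post; simp [pvPopOps]
  | cons x rest ih =>
    intro post
    simp only [pvPopOps, List.nil_append]
    split
    · rw [ih (post ++ [x]), ih [x]]
      simp [List.append_assoc]
    · simp


theorem pv_shunt_acc (ts : List String) : ∀ stack post,
    pvShuntGo ts stack post = (pvShuntGo ts stack []).map (post ++ ·) := by
  induction ts with
  | nil => intro stack post; simp [pvShuntGo]
  | cons t ts ih =>
    intro stack post
    simp only [pvShuntGo, List.nil_append]
    split_ifs with ht1 ht0 ht2 ht3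
    · exact ih _ post
    · exact ih _ post
    · rw [pv_popUntil_acc stack post]
      cases hr : pvPopUntil stack [] with
      | none => rfl
      | some sp =>
        simp only [Option.map_some]
        rw [ih sp.1 (post ++ sp.2), ih sp.1 sp.2]
        cases hs : pvShuntGo ts sp.1 [] <;> simp [List.append_assoc]
    · rw [pv_popOps_acc stack post]
      simp only
      rw [ih (t :: (pvPopOps stack []).1) (post ++ (pvPopOps stack []).2),
          ih (t :: (pvPopOps stack []).1) (pvPopOps stack []).2]
      cases hs : pvShuntGo ts (t :: (pvPopOps stack []).1) [] <;> simp [List.append_assoc]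
    · rw [ih stack (post ++ [t]), ih stack [t]]
      cases hs : pvShuntGo ts stack [] <;> simp [List.append_assoc]
theorem pv_contains_eq_isOp (t : String) : pvOPS.contains t = pvIsOp t := by
  by_cases h1 : t = "+"
  · subst h1; decide
  by_cases h2 : t = "-"
  · subst h2; decide
  by_cases h3 : t = "*"
  · subst h3; decide
  by_cases h4 : t = "/"
  · subst h4; decide
  have hop : pvIsOp t = false := by
    simp [pvIsOp, h1, h2, h3, h4]
  rw [hop]
  show (((((PySem.Dict.empty.insert "+" "plus").insert "-" "minus").insert "*" "times").insert
      "/" "divided by")).contains t = false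
  simp [PySem.Dict.contains_insert, PySem.Dict.empty, PySem.Dict.contains_mk, h1, h2, h3, h4]


theorem pv_emit_eq (v : List String) (t : String) : pvEmitB v t = pvEmitA v t := by
  simp only [pvEmitB, pvEmitA, pv_contains_eq_isOp]
  by_cases hop : pvIsOp t = true
  · rw [if_pos hop, if_pos hop]
    cases v with
    | nil => rfl
    | cons r v' =>
      cases v' with
      | nil => rfl
      | cons l rest =>
        simp only [pvIsOp, Bool.or_eq_true, beq_iff_eq] at hop
        rcases hop with ((h | h) | h) | h <;> subst h <;> rfl
  · rw [if_neg hop, if_neg hop]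


theorem pv_drainAll_eq (p : List String) : ∀ v, pvDrainAll p v = pvEvalFold p v := by
  induction p with
  | nil => intro v; rfl
  | cons x rest ih =>
    intro v
    simp only [pvDrainAll, pvEvalFold, pv_emit_eq]
    cases he : pvEmitA v x <;> simp [ih]


theorem pv_evalFold_append (p q : List String) : ∀ st,
    pvEvalFold (p ++ q) st = (pvEvalFold p st).bind fun st' => pvEvalFold q st' := by
  induction p with
  | nil => intro st; simp [pvEvalFold]
  | cons t p ih =>
    intro st
    simp only [List.cons_append, pvEvalFold]
    cases he : pvEmitA st t <;> simp [ih]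


theorem pv_popUntil_mem (stack post : List String) (sp : List String × List String)
    (h : pvPopUntil stack post = some sp) : ∀ x ∈ sp.1, x ∈ stack := by
  induction stack generalizing post with
  | nil => simp [pvPopUntil] at h
  | cons y rest ih =>
    by_cases hy : y = "("
    · simp only [pvPopUntil, if_pos hy] at h
      cases h
      intro x hx
      exact List.mem_cons_of_mem _ hx
    · simp only [pvPopUntil, if_neg hy] at h
      intro x hx
      exact List.mem_cons_of_mem _ (ih _ h x hx)


theorem pv_popOps_mem (stack post : List String) : ∀ x ∈ (pvPopOps stack post).1, x ∈ stack := by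
  induction stack generalizing post with
  | nil => simp [pvPopOps]
  | cons y rest ih =>
    simp only [pvPopOps]
    split
    · intro x hx
      exact List.mem_cons_of_mem _ (ih _ x hx)
    · intro x hx
      exact hx


theorem pv_drainUntil_eq (stack : List String) : ∀ v,
    pvDrainUntil stack v =
      (pvPopUntil stack []).bind fun sp => (pvEvalFold sp.2 v).map fun v' => (sp.1, v') := by
  induction stack with
  | nil => intro v; rfl
  | cons x rest ih =>
    intro v
    by_cases hx : x = "("
    · subst hx
      simp [pvDrainUntil, pvPopUntil, pvEvalFold]
    · simp only [pvDrainUntil, if_neg hx, pvPopUntil, List.nil_append]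
      rw [pv_popUntil_acc rest [x], pv_emit_eq]
      cases he : pvEmitA v x with
      | none => cases hr : pvPopUntil rest [] <;> simp [pvEvalFold, he, hr]
      | some v' =>
        cases hr : pvPopUntil rest [] <;>
          simp [pvEvalFold, he, hr, ih v']


theorem pv_drainOps_eq (stack : List String) (hst : ∀ x ∈ stack, x = "(" ∨ pvIsOp x = true) : ∀ v,
    pvDrainOps stack v =
      (pvEvalFold (pvPopOps stack []).2 v).map fun v' => ((pvPopOps stack []).1, v') := by
  induction stack with
  | nil => intro v; simp [pvDrainOps, pvPopOps, pvEvalFold]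
  | cons x rest ih =>
    intro v
    by_cases hx : x = "("
    · subst hx
      have h1 : pvDrainOps ("(" :: rest) v = some ("(" :: rest, v) := by
        simp [pvDrainOps]
      have h2 : pvPopOps ("(" :: rest) [] = ("(" :: rest, []) := by
        simp [pvPopOps]
      rw [h1, h2]
      simp [pvEvalFold]
    · have hxop : pvIsOp x = true := by
        rcases hst x List.mem_cons_self with h | h
        · exact absurd h hx
        · exact h
      have hst' : ∀ y ∈ rest, y = "(" ∨ pvIsOp y = true :=
        fun y hy => hst y (List.mem_cons_of_mem _ hy)
      simp only [pvDrainOps, if_neg hx, pvPopOps, List.nil_append]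
      rw [if_pos ⟨hx, hxop⟩, pv_popOps_acc rest [x], pv_emit_eq]
      cases he : pvEmitA v x with
      | none => simp [pvEvalFold, he]
      | some v' => simp [pvEvalFold, he, ih hst' v']
theorem pv_fusion (ts : List String) : ∀ stack Q v,
    (∀ x ∈ ts, x ≠ "") → (∀ x ∈ stack, x = "(" ∨ pvIsOp x = true) →
    pvShuntGo ts stack [] = some Q →
    ((pvBGo ts v stack).bind fun vp => pvDrainAll vp.2 vp.1) = pvEvalFold Q v := by
  induction ts with
  | nil =>
    intro stack Q v _ _ hsh
    simp only [pvShuntGo, List.nil_append] at hsh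
    cases hsh
    simp only [pvBGo, Option.bind_some]
    exact pv_drainAll_eq stack v
  | cons t ts ih =>
    intro stack Q v hne hst hsh
    have hne' : ∀ x ∈ ts, x ≠ "" := fun x hx => hne x (List.mem_cons_of_mem _ hx)
    have hnt : t ≠ "" := hne t List.mem_cons_self
    simp only [pvShuntGo] at hsh
    simp only [pvBGo, pv_contains_eq_isOp]
    by_cases ht1 : t = "("
    · rw [if_pos ht1] at hsh ⊢
      refine ih _ _ _ hne' ?_ hsh
      intro x hx
      rcases List.mem_cons.mp hx with h | h
      · exact Or.inl h
      · exact hst x h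
    · rw [if_neg ht1] at hsh ⊢
      rw [if_neg hnt] at hsh
      by_cases ht2 : t = ")"
      · rw [if_pos ht2] at hsh ⊢
        cases hpu : pvPopUntil stack [] with
        | none => rw [hpu] at hsh; exact absurd hsh (by simp)
        | some sp =>
          rw [hpu] at hsh
          dsimp only at hsh
          rw [pv_shunt_acc ts sp.1 sp.2] at hsh
          cases hq : pvShuntGo ts sp.1 [] with
          | none => rw [hq] at hsh; cases hsh
          | some Q' =>
            rw [hq] at hsh
            simp only [Option.map_some, Option.some_inj] at hsh
            subst hsh
            rw [pv_drainUntil_eq stack v, hpu]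
            simp only [Option.bind_some]
            rw [pv_evalFold_append]
            cases hev : pvEvalFold sp.2 v with
            | none => simp
            | some v' =>
              simp only [Option.map_some, Option.bind_some]
              refine ih sp.1 Q' v' hne' ?_ hq
              intro x hx
              exact hst x (pv_popUntil_mem stack [] sp hpu x hx)
      · rw [if_neg ht2] at hsh ⊢
        by_cases ht3 : pvIsOp t = true
        · rw [if_pos ht3] at hsh ⊢
          rw [pv_shunt_acc ts (t :: (pvPopOps stack []).1) (pvPopOps stack []).2] at hsh
          cases hq : pvShuntGo ts (t :: (pvPopOps stack []).1) [] with
          | none => rw [hq] at hsh; cases hsh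
          | some Q' =>
            rw [hq] at hsh
            simp only [Option.map_some, Option.some_inj] at hsh
            subst hsh
            rw [pv_drainOps_eq stack hst v]
            rw [pv_evalFold_append]
            cases hev : pvEvalFold (pvPopOps stack []).2 v with
            | none => simp
            | some v' =>
              simp only [Option.map_some, Option.bind_some]
              refine ih (t :: (pvPopOps stack []).1) Q' v' hne' ?_ hq
              intro x hx
              rcases List.mem_cons.mp hx with h | h
              · exact Or.inr (h ▸ ht3)
              · exact hst x (pv_popOps_mem stack [] x h)
        · rw [if_neg ht3] at hsh ⊢
          rw [pv_shunt_acc ts stack ([] ++ [t])] at hsh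
          cases hq : pvShuntGo ts stack [] with
          | none => rw [hq] at hsh; cases hsh
          | some Q' =>
            rw [hq] at hsh
            simp only [Option.map_some, Option.some_inj, List.nil_append] at hsh
            subst hsh
            have hemit : pvEmitB v t = some (t :: v) := by
              simp [pvEmitB, pv_contains_eq_isOp, ht3]
            rw [hemit]
            simp only [Option.bind_some]
            have : pvEvalFold ([t] ++ Q') v = pvEvalFold Q' (t :: v) := by
              simp [pvEvalFold, pvEmitA, ht3]
            rw [this]
            exact ih stack Q' (t :: v) hne' hst hq


-- ===== VERDICT (by name: the statement is the Claim_ definition above) =====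
theorem equation_to_natural_language_spec : Claim_equal_equation_to_natural_language := by
  intro equation hDom hPre
  unfold Spec_equation_to_natural_language
  unfold Pre_equation_to_natural_language at hPre
  have htok : pvTokOk (pvTokenize equation) 0 = true := by
    have h := pv_tokOk_tokenizeGo equation.toList [] 0 (by simp)
    rw [pvTokenize, h]
    exact hPre
  obtain ⟨Q, hQ⟩ := pv_shunt_success (pvTokenize equation) [] []
    (by simpa using htok)
  have hQf : pvShuntGo ((pvTokenize equation).filter (fun t => t != "")) [] [] = some Q := by
    rw [pv_shunt_filter]; exact hQ
  have hfus := pv_fusion ((pvTokenize equation).filter (fun t => t != "")) [] Q []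
      (by intro x hx; simpa using (List.mem_filter.mp hx).2)
      (by simp) hQf
  unfold equation_to_natural_language equation_to_natural_language_alt
  rw [hQ]
  have hB : ((pvBGo ((pvTokenize equation).filter (fun t => t != "")) [] []).bind
      (fun vp => (pvDrainAll vp.2 vp.1).bind List.head?)) = (pvEvalFold Q []).bind List.head? := by
    rw [← hfus]
    cases pvBGo ((pvTokenize equation).filter (fun t => t != "")) [] [] <;> simp
  rw [hB]

theorem equation_to_natural_language_raises : Claim_raises_equation_to_natural_language := by
  unfold Claim_raises_equation_to_natural_language
  exact ⟨by intro e _ hr hp; simp [Raises_equation_to_natural_language] at hr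
            simp [Pre_equation_to_natural_language, hr] at hp, by decide⟩

-- self-check: the crash-fix witness value, read off from the theorem above
theorem pv_raises_witness_ok :
    equation_to_natural_language_alt pvRaiseWitness_equation_to_natural_language =
      pvRaiseWitnessOut_equation_to_natural_language :=
  equation_to_natural_language_raises.2.2.2
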